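-- pv_equiv track=rewrite | github.com/cheran-senthil/TLE | tle/cogs/lockout.py | _calc_round_score
-- ===== SOURCE A (Python) =====
-- from functools import cmp_to_key
-- from collections import namedtuple
--
-- def _calc_round_score(users, status, times):
--     def comp(a, b):
--         if a[0] > b[0]:
--             return -1
--         if a[0] < b[0]:
--             return 1
--         if a[1] == b[1]:
--             return 0
--         return -1 if a[1] < b[1] else 1
--
--     ranks = [[status[i], times[i], users[i]] for i in range(len(status))]
--     ranks.sort(key=cmp_to_key(comp))
--     res = []
--
--     for user in ranks:
--         User = namedtuple("User", "id points rank")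
--         # user points rank
--         res.append(User(user[2], user[0], [[x[0], x[1]] for x in ranks].index([user[0], user[1]]) + 1))
--     return res
-- ===== SOURCE B (Python) =====
-- from collections import namedtuple
--
-- User = namedtuple("User", "id points rank")
--
-- def _calc_round_score(users, status, times):
--     rows = sorted(((status[i], times[i], users[i]) for i in range(len(status))),
--                   key=lambda r: (-r[0], r[1]))
--     res = []
--     prev_key = None
--     prev_rank = 0
--     for i, (p, t, u) in enumerate(rows):
--         if (p, t) != prev_key:
--             prev_key = (p, t)
--             prev_rank = i + 1
--         res.append(User(u, p, prev_rank))
--     return res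
-- ===== Notes on version B (the rewrite author's own statement) =====
-- stated objective: faster
-- what changed: A re-sorts with a hand comparator and computes each rank by rebuilding the (points,time) pair list and scanning it with .index per row; B sorts once by the key (-points, time) and assigns competition ranks in a single linear sweep carrying the previous key and rank, so the per-row rebuild-and-scan disappears.
import Mathlib
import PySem

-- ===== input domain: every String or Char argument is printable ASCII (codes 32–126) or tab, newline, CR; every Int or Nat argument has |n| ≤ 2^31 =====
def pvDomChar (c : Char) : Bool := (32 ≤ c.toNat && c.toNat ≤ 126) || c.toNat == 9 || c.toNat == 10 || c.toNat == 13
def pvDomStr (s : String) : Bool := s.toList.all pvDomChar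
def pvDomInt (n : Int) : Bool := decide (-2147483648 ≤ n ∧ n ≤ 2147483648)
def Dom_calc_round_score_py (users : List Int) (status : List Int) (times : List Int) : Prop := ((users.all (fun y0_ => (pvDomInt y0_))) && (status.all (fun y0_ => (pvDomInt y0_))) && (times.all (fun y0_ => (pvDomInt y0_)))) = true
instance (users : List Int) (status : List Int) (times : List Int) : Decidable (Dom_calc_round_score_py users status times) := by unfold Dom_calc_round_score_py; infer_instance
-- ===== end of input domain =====

-- B replaces A's per-row pair-list rebuild + .index scan (quadratic) by one sorted pass
-- carrying the previous (points, time) key and rank: same return value, O(n log n).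

-- ===== PORT A =====
-- A's comparator `comp`, transliterated (returns -1/0/1).
def pyComp (a b : Int × Int × Int) : Int :=
  if a.1 > b.1 then -1
  else if a.1 < b.1 then 1
  else if a.2.1 = b.2.1 then 0
  else if a.2.1 < b.2.1 then -1 else 1

-- cmp_to_key(comp) gives `a < b ↔ comp a b < 0`; Python's stable list.sort under that
-- key is exactly PySem's stable insertion sort (foldl insertBy) with this `before`.
def pyCompLt (a b : Int × Int × Int) : Bool := decide (pyComp a b < 0)

-- `[[status[i], times[i], users[i]] for i in range(len(status))]`; the rows are triples.
-- Under Pre_ every pyGet? succeeds, so the `.getD 0` default is never used.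
def rowsA (users status times : List Int) : List (Int × Int × Int) :=
  (PySem.List.pyRange 0 (status.length : Int) 1).map
    (fun i => ((PySem.List.pyGet? status i).getD 0,
               (PySem.List.pyGet? times i).getD 0,
               (PySem.List.pyGet? users i).getD 0))

-- Python's `.index` would raise ValueError on a missing value; here the looked-up pair
-- is always an element of `pairs`, so `.getD 0` is never used.
def calc_round_score_py (users : List Int) (status : List Int) (times : List Int) : List (Int × Int × Int) :=
  let ranks := (rowsA users status times).foldl (fun acc x => PySem.List.insertBy pyCompLt x acc) []
  ranks.map (fun x =>
    (x.2.2, x.1,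
     ((PySem.List.index? (ranks.map (fun y => (y.1, y.2.1))) (x.1, x.2.1)).getD 0 : Int) + 1))

-- ===== PORT B =====
def rowsB (users status times : List Int) : List (Int × Int × Int) :=
  (PySem.List.pyRange 0 (status.length : Int) 1).map
    (fun i => ((PySem.List.pyGet? status i).getD 0,
               (PySem.List.pyGet? times i).getD 0,
               (PySem.List.pyGet? users i).getD 0))

-- B's single sweep: i is the enumerate index, pk/pr the carried previous key and rank.
def bLoop : List (Int × Int × Int) → Nat → Option (Int × Int) → Int → List (Int × Int × Int)
  | [], _, _, _ => []
  | (p, t, u) :: rest, i, pk, pr =>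
      if pk = some (p, t) then (u, p, pr) :: bLoop rest (i + 1) pk pr
      else (u, p, (i : Int) + 1) :: bLoop rest (i + 1) (some (p, t)) ((i : Int) + 1)

def calc_round_score_py_alt (users : List Int) (status : List Int) (times : List Int) : List (Int × Int × Int) :=
  bLoop (PySem.List.sorted2 (rowsB users status times) (fun r => -r.1) (fun r => r.2.1)) 0 none 0

-- ===== PRECONDITION & SPEC =====
-- Pre_ excludes exactly the inputs where Python A raises IndexError: users[i] or
-- times[i] with i < len(status) out of range.
def Pre_calc_round_score_py (users : List Int) (status : List Int) (times : List Int) : Prop :=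
  status.length ≤ users.length ∧ status.length ≤ times.length
instance (users : List Int) (status : List Int) (times : List Int) : Decidable (Pre_calc_round_score_py users status times) := by unfold Pre_calc_round_score_py; infer_instance
def pvWitness_calc_round_score_py : List Int × List Int × List Int := ([7, 3], [1, 1], [10, 20])

def Spec_calc_round_score_py (users : List Int) (status : List Int) (times : List Int) (out : List (Int × Int × Int)) : Prop := out = calc_round_score_py_alt users status times
instance (users : List Int) (status : List Int) (times : List Int) (out : List (Int × Int × Int)) : Decidable (Spec_calc_round_score_py users status times out) := by unfold Spec_calc_round_score_py; infer_instance

-- ===== CLAIM (what is proved, stated in full; the proofs are below) =====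
def Claim_equal_calc_round_score_py : Prop := ∀ (users : List Int) (status : List Int) (times : List Int), Dom_calc_round_score_py users status times → Pre_calc_round_score_py users status times → Spec_calc_round_score_py users status times (calc_round_score_py users status times)

-- ===== LEMMAS AND PROOFS =====

-- the (points, time) pair of a row
def pairOf (x : Int × Int × Int) : Int × Int := (x.1, x.2.1)

-- "a ranks no worse than b": points descending, then time ascending
def lexLe (a b : Int × Int) : Prop := b.1 < a.1 ∨ (a.1 = b.1 ∧ a.2 ≤ b.2)

theorem compLt_false_iff (a b : Int × Int × Int) :
    pyCompLt a b = false ↔ lexLe (pairOf b) (pairOf a) := by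
  simp only [pyCompLt, pyComp, lexLe, pairOf, decide_eq_false_iff_not]
  split_ifs <;> omega

theorem compLt_true_iff (a b : Int × Int × Int) :
    pyCompLt a b = true ↔ (b.1 < a.1 ∨ (a.1 = b.1 ∧ a.2.1 < b.2.1)) := by
  simp only [pyCompLt, pyComp, decide_eq_true_eq]
  split_ifs <;> omega

theorem pairwise_insertBy_lex (x : Int × Int × Int) (ys : List (Int × Int × Int))
    (h : ys.Pairwise (fun a b => lexLe (pairOf a) (pairOf b))) :
    (PySem.List.insertBy pyCompLt x ys).Pairwise (fun a b => lexLe (pairOf a) (pairOf b)) := by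
  induction ys with
  | nil => simp [PySem.List.insertBy]
  | cons y ys ih =>
    rw [List.pairwise_cons] at h
    simp only [PySem.List.insertBy]
    by_cases hb : pyCompLt x y = true
    · rw [if_pos hb]
      have hxy' := (compLt_true_iff x y).1 hb
      constructor
      · intro z hz
        rcases List.mem_cons.1 hz with he | hz
        · rw [he]; simp only [lexLe, pairOf]; omega
        · have h2 := h.1 z hz
          simp only [lexLe, pairOf] at h2 ⊢
          omega
      · exact List.Pairwise.cons h.1 h.2
    · rw [if_neg hb]
      constructor
      · intro z hz
        rcases (PySem.List.mem_insertBy _ _ _ _).1 hz with he | hz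
        · rw [he]
          have hb' : pyCompLt x y = false := by revert hb; cases pyCompLt x y <;> simp
          exact (compLt_false_iff x y).1 hb'
        · exact h.1 z hz
      · exact ih h.2

theorem pairwise_sortfold (l acc : List (Int × Int × Int))
    (hacc : acc.Pairwise (fun a b => lexLe (pairOf a) (pairOf b))) :
    (l.foldl (fun acc x => PySem.List.insertBy pyCompLt x acc) acc).Pairwise
      (fun a b => lexLe (pairOf a) (pairOf b)) := by
  induction l generalizing acc with
  | nil => exact hacc
  | cons x l ih => exact ih _ (pairwise_insertBy_lex x acc hacc)

theorem index?_prefix_not_mem {pre suf : List (Int × Int)} {v : Int × Int} (h : v ∉ pre) :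
    PySem.List.index? (pre ++ v :: suf) v = some pre.length :=
  (PySem.List.index?_eq_some_iff _ _ _).2 ⟨pre, suf, rfl, rfl, h⟩

-- Main loop invariant: along the sorted list M = done ++ L, B's carried rank equals
-- A's first-occurrence index (+1) of the carried key; the previous key is maximal
-- among the keys seen so far.
theorem bLoop_eq (M : List (Int × Int × Int))
    (hpw : M.Pairwise (fun a b => lexLe (pairOf a) (pairOf b))) :
    ∀ (L done : List (Int × Int × Int)) (pk : Option (Int × Int)) (pr : Int),
      M = done ++ L →
      ((pk = none ∧ done = []) ∨
        (∃ q, pk = some q ∧ (∃ d ∈ done, pairOf d = q) ∧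
          pr = ((PySem.List.index? (M.map pairOf) q).getD 0 : Int) + 1 ∧
          ∀ d ∈ done, lexLe (pairOf d) q)) →
      bLoop L done.length pk pr =
        L.map (fun x => (x.2.2, x.1,
          ((PySem.List.index? (M.map pairOf) (pairOf x)).getD 0 : Int) + 1)) := by
  intro L
  induction L with
  | nil => intro done pk pr _ _; rfl
  | cons x rest ih =>
    intro done pk pr hM hinv
    obtain ⟨p, t, u⟩ := x
    have hcross : ∀ d ∈ done, lexLe (pairOf d) (pairOf (p, t, u)) := by
      intro d hd
      subst hM
      have := (List.pairwise_append.1 hpw).2.2 d hd (p, t, u) (by simp)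
      exact this
    by_cases hpk : pk = some (p, t)
    · -- same key as the previous row: keep the carried rank
      rcases hinv with ⟨_, _⟩ | ⟨q, hq, ⟨d0, hd0, hd0q⟩, hpr, hmax⟩
      · simp_all
      · have hqe : q = (p, t) := by rw [hpk] at hq; exact (Option.some_inj.mp hq).symm
        subst hqe
        simp only [bLoop, if_pos hpk, List.map_cons]
        have hpe : pairOf (p, t, u) = (p, t) := rfl
        rw [hpe]
        refine congrArg₂ _ (by rw [hpr]) ?_
        have := ih (done ++ [(p, t, u)]) pk pr (by simp [hM]) ?_
        · simpa [List.length_append] using this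
        · right
          exact ⟨(p, t), hpk, ⟨(p, t, u), by simp, rfl⟩, hpr, by
            intro d hd
            rcases List.mem_append.1 hd with hd | hd
            · exact hmax d hd
            · simp at hd; subst hd; simp [lexLe, pairOf]⟩
    · -- new key: its first occurrence in M is exactly here, at index done.length
      have hnotmem : (p, t) ∉ done.map pairOf := by
        intro hmem
        rcases List.mem_map.1 hmem with ⟨d, hd, hdp⟩
        rcases hinv with ⟨_, hde⟩ | ⟨q, hq, ⟨d0, hd0, hd0q⟩, _, hmax⟩
        · subst hde; simp at hd
        · have h1 : lexLe (pairOf d) q := hmax d hd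
          have h2 : lexLe (pairOf d0) (pairOf (p, t, u)) := hcross d0 hd0
          have hqp : q ≠ (p, t) := fun he => hpk (hq.trans (by rw [he]))
          rw [hdp] at h1
          rw [hd0q] at h2
          simp only [lexLe, pairOf] at h1 h2
          apply hqp
          have hq12 : q.1 = p ∧ q.2 = t := by omega
          exact Prod.ext hq12.1 hq12.2
      have hidx : PySem.List.index? (M.map pairOf) (p, t) = some done.length := by
        rw [hM, List.map_append, List.map_cons]
        have : pairOf (p, t, u) = (p, t) := rfl
        rw [this]
        have := index?_prefix_not_mem (pre := done.map pairOf)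
          (suf := rest.map pairOf) hnotmem
        simpa using this
      simp only [bLoop, if_neg hpk, List.map_cons]
      have hpe : pairOf (p, t, u) = (p, t) := rfl
      refine congrArg₂ _ ?_ ?_
      · rw [hpe, hidx]; rfl
      · have := ih (done ++ [(p, t, u)]) (some (p, t)) ((done.length : Int) + 1)
          (by simp [hM]) ?_
        · simpa [List.length_append] using this
        · right
          refine ⟨(p, t), rfl, ⟨(p, t, u), by simp, rfl⟩, by rw [hidx]; rfl, ?_⟩
          intro d hd
          rcases List.mem_append.1 hd with hd | hd
          · exact hcross d hd
          · simp at hd; subst hd; simp [lexLe, pairOf]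

-- B's sorted2 key (-points, time) induces exactly A's comparator order
theorem sorted2_eq_foldA (l : List (Int × Int × Int)) :
    PySem.List.sorted2 l (fun r => -r.1) (fun r => r.2.1) =
      l.foldl (fun acc x => PySem.List.insertBy pyCompLt x acc) [] := by
  simp only [PySem.List.sorted2, if_neg (by decide : ¬ (false = true))]
  have hfe : (fun (a b : Int × Int × Int) =>
      (decide (-a.1 < -b.1) || (!decide (-b.1 < -a.1) && decide (a.2.1 < b.2.1)))) = pyCompLt := by
    funext a b
    rcases Bool.eq_false_or_eq_true (pyCompLt a b) with hb | hb
    · rw [hb]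
      have := (compLt_true_iff a b).1 hb
      simp only [Bool.or_eq_true, Bool.and_eq_true, decide_eq_true_eq,
        Bool.not_eq_true', decide_eq_false_iff_not]
      omega
    · rw [hb]
      have := (compLt_false_iff a b).1 hb
      simp only [lexLe, pairOf] at this
      simp only [Bool.or_eq_false_iff, Bool.and_eq_false_iff, decide_eq_false_iff_not,
        Bool.not_eq_false', decide_eq_true_eq]
      omega
  rw [hfe]

-- ===== VERDICT (by name: the statement is the Claim_ definition above) =====
theorem calc_round_score_py_spec : Claim_equal_calc_round_score_py := by
  intro users status times _ _
  unfold Spec_calc_round_score_py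
  unfold calc_round_score_py calc_round_score_py_alt
  rw [sorted2_eq_foldA]
  have hrows : rowsB users status times = rowsA users status times := rfl
  rw [hrows]
  set L := (rowsA users status times).foldl (fun acc x => PySem.List.insertBy pyCompLt x acc) []
    with hL
  have hpw : L.Pairwise (fun a b => lexLe (pairOf a) (pairOf b)) :=
    pairwise_sortfold _ [] (by simp)
  have := bLoop_eq L hpw L [] none 0 rfl (Or.inl ⟨rfl, rfl⟩)
  simp only [List.length_nil] at this
  rw [this]
  rfl
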